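-- pv_equiv track=rewrite | github.com/whysokara/No-look-urinial | app.py | find_optimal_position
-- ===== SOURCE A (Python) =====
-- from typing import List, Set
--
-- def find_optimal_position(total_urinals: int, occupied: Set[int]) -> int:
--     """Find the optimal urinal position."""
--     if not occupied:
--         return 1  # If none occupied, take the first position
--
--     max_min_distance = 0
--     optimal_position = -1
--
--     # Try each available position
--     for pos in range(1, total_urinals + 1):
--         if pos in occupied:
--             continue
--
--         # Calculate minimum distance to any occupied urinal
--         min_distance = float('inf')
--         for occ in occupied:
--             distance = abs(pos - occ)
--             min_distance = min(min_distance, distance)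
--
--         # Update optimal position if this position has a better minimum distance
--         if min_distance > max_min_distance:
--             max_min_distance = min_distance
--             optimal_position = pos
--
--     return optimal_position
-- ===== SOURCE B (Python) =====
-- def find_optimal_position(total_urinals, occupied):
--     """Find the optimal urinal position (sort once + single advancing pointer)."""
--     if not occupied:
--         return 1
--     ys = sorted(occupied)
--     m = len(ys)
--     i = 0
--     best_d = 0
--     best_pos = -1
--     for pos in range(1, total_urinals + 1):
--         while i < m and ys[i] < pos:
--             i += 1
--         if i < m and ys[i] == pos:
--             continue
--         if i == m:
--             d = pos - ys[m - 1]
--         elif i == 0: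
--             d = ys[0] - pos
--         else:
--             d = min(ys[i] - pos, pos - ys[i - 1])
--         if d > best_d:
--             best_d = d
--             best_pos = pos
--     return best_pos
-- ===== Notes on version B (the rewrite author's own statement) =====
-- stated objective: faster
-- what changed: B sorts the occupied positions once and sweeps the candidate positions with a single advancing pointer, reading the nearest occupied urinal from the two sorted neighbours, instead of A's inner scan over every occupied urinal for every candidate.
import Mathlib
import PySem

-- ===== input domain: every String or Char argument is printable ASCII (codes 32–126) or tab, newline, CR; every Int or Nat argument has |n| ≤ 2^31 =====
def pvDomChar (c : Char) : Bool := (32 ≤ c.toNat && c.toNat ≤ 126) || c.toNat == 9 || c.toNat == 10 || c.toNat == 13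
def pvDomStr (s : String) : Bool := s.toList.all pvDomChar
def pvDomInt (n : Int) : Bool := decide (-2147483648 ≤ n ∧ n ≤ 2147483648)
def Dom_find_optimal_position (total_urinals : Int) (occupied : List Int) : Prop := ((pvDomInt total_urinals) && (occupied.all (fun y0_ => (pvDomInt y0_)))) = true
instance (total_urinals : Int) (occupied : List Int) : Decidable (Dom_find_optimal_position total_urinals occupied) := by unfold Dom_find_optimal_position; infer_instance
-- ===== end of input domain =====

-- B replaces A's per-candidate scan over all occupied urinals by one sort plus a single
-- advancing pointer over the sorted occupied list (objective: faster, asymptotically).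

-- ===== PORT A =====
-- loop body of A's outer `for pos in range(...)` loop; state = (max_min_distance, optimal_position)
def fopStepA (occupied : List Int) (st : Int × Int) (pos : Int) : Int × Int :=
  if occupied.contains pos then st
  else
    -- min_distance = float('inf'); for occ in occupied: min_distance = min(min_distance, abs(pos-occ))
    let md : Option Int := occupied.foldl
      (fun m occ => some (match m with
        | none => |pos - occ|
        | some v => min v |pos - occ|)) none
    match md with
    | none => st   -- unreachable guard for totality: occupied ≠ [] on this path (md = inf only for empty set)
    | some v => if v > st.1 then (v, pos) else st

def find_optimal_position (total_urinals : Int) (occupied : List Int) : Int :=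
  if occupied.isEmpty then 1
  else
    ((PySem.List.pyRange 1 (total_urinals + 1) 1).foldl (fopStepA occupied) (0, -1)).2

-- ===== PORT B =====
-- the `while i < m and ys[i] < pos: i += 1` loop of B
def fopAdvance (ys : List Int) (pos : Int) (i : Nat) : Nat :=
  if h : i < ys.length then
    if ys.getD i 0 < pos then fopAdvance ys pos (i + 1) else i
  else i
termination_by ys.length - i

-- loop body of B's `for pos in range(...)` loop; state = (i, best_d, best_pos)
def fopStepB (ys : List Int) (st : Nat × Int × Int) (pos : Int) : Nat × Int × Int :=
  let i := fopAdvance ys pos st.1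
  if i < ys.length ∧ ys.getD i 0 = pos then (i, st.2)
  else
    let d : Int :=
      if i = ys.length then pos - ys.getD (ys.length - 1) 0
      else if i = 0 then ys.getD 0 0 - pos
      else min (ys.getD i 0 - pos) (pos - ys.getD (i - 1) 0)
    if d > st.2.1 then (i, d, pos) else (i, st.2)

def find_optimal_position_alt (total_urinals : Int) (occupied : List Int) : Int :=
  if occupied.isEmpty then 1
  else
    let ys := PySem.List.sorted occupied (fun x => x) false
    ((PySem.List.pyRange 1 (total_urinals + 1) 1).foldl (fopStepB ys) (0, 0, -1)).2.2

-- ===== PRECONDITION & SPEC =====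
def Spec_find_optimal_position (total_urinals : Int) (occupied : List Int) (out : Int) : Prop := out = find_optimal_position_alt total_urinals occupied
instance (total_urinals : Int) (occupied : List Int) (out : Int) : Decidable (Spec_find_optimal_position total_urinals occupied out) := by unfold Spec_find_optimal_position; infer_instance

-- ===== CLAIM (what is proved, stated in full; the proofs are below) =====
def Claim_equal_find_optimal_position : Prop := ∀ (total_urinals : Int) (occupied : List Int), Dom_find_optimal_position total_urinals occupied → Spec_find_optimal_position total_urinals occupied (find_optimal_position total_urinals occupied)

-- ===== LEMMAS AND PROOFS =====

-- invariant carried by B's pointer: everything strictly left of i is < p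
def FopInv (ys : List Int) (i : Nat) (p : Int) : Prop :=
  ∀ j, j < i → j < ys.length → ys.getD j 0 < p

lemma fopAdvance_spec (ys : List Int) (pos : Int) :
    ∀ i, i ≤ ys.length → FopInv ys i pos →
      fopAdvance ys pos i ≤ ys.length ∧
      FopInv ys (fopAdvance ys pos i) pos ∧
      (∀ _ : fopAdvance ys pos i < ys.length, pos ≤ ys.getD (fopAdvance ys pos i) 0) := by
  intro i
  fun_induction fopAdvance ys pos i with
  | case1 i h hlt ih =>
    intro _ hinv
    exact ih (by omega) (fun j hj hjl => by
      rcases Nat.lt_or_ge j i with hji | hji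
      · exact hinv j hji hjl
      · have : j = i := by omega
        simpa [this] using hlt)
  | case2 i h hlt =>
    intro _ hinv
    exact ⟨by omega, hinv, fun _ => by omega⟩
  | case3 i h =>
    intro hile hinv
    exact ⟨hile, hinv, fun hc => absurd hc h⟩

-- A's inner fold with the inf seed, once the first element is absorbed
lemma foldA_opt (pos : Int) :
    ∀ (l : List Int) (d : Int),
      l.foldl (fun m occ => some (match m with
        | none => |pos - occ|
        | some v => min v |pos - occ|)) (some d)
      = some (l.foldl (fun v occ => min v |pos - occ|) d) := by
  intro l
  induction l with
  | nil => intro d; rfl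
  | cons o t ih => intro d; simpa [List.foldl] using ih (min d |pos - o|)

lemma foldMin_spec (pos : Int) :
    ∀ (l : List Int) (d : Int),
      (l.foldl (fun v occ => min v |pos - occ|) d ≤ d) ∧
      (∀ o ∈ l, l.foldl (fun v occ => min v |pos - occ|) d ≤ |pos - o|) ∧
      (l.foldl (fun v occ => min v |pos - occ|) d = d ∨
        ∃ o ∈ l, l.foldl (fun v occ => min v |pos - occ|) d = |pos - o|) := by
  intro l
  induction l with
  | nil => intro d; exact ⟨le_refl _, fun o ho => absurd ho (List.not_mem_nil), Or.inl rfl⟩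
  | cons o t ih =>
    intro d
    obtain ⟨h1, h2, h3⟩ := ih (min d |pos - o|)
    refine ⟨le_trans h1 (min_le_left _ _), ?_, ?_⟩
    · intro o' ho'
      rcases List.mem_cons.mp ho' with rfl | ho'
      · exact le_trans h1 (min_le_right _ _)
      · exact h2 o' ho'
    · rcases h3 with h3 | ⟨o', ho', h3⟩
      · rcases min_cases d |pos - o| with ⟨he, _⟩ | ⟨he, _⟩
        · exact Or.inl (h3.trans he)
        · exact Or.inr ⟨o, List.mem_cons_self, h3.trans he⟩
      · exact Or.inr ⟨o', List.mem_cons_of_mem _ ho', h3⟩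

lemma getD_mono (ys : List Int) (hs : ys.Pairwise (· ≤ ·)) :
    ∀ j k, j ≤ k → k < ys.length → ys.getD j 0 ≤ ys.getD k 0 := by
  intro j k hjk hk
  have hj : j < ys.length := lt_of_le_of_lt (Nat.lt_succ_iff.mp (Nat.lt_succ_of_le hjk)) hk
  rw [List.getD_eq_getElem ys 0 hj, List.getD_eq_getElem ys 0 hk]
  rcases Nat.lt_or_ge j k with h | h
  · exact (List.pairwise_iff_getElem.mp hs) j k hj hk h
  · have : j = k := by omega
    subst this; rfl

-- B's computed d is the minimum distance from pos to an element of ys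
lemma fopD_spec (ys : List Int) (pos : Int) (r : Nat) (d : Int)
    (hys : ys ≠ []) (hs : ys.Pairwise (· ≤ ·))
    (hr : r ≤ ys.length) (hinv : FopInv ys r pos)
    (hge : ∀ _ : r < ys.length, pos ≤ ys.getD r 0)
    (hne : ¬ (r < ys.length ∧ ys.getD r 0 = pos))
    (hd : d = if r = ys.length then pos - ys.getD (ys.length - 1) 0
      else if r = 0 then ys.getD 0 0 - pos
      else min (ys.getD r 0 - pos) (pos - ys.getD (r - 1) 0)) :
    (∀ y ∈ ys, d ≤ |pos - y|) ∧ (∃ y ∈ ys, d = |pos - y|) := by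
  have hlen : 0 < ys.length := List.length_pos_iff.mpr hys
  have hmemD : ∀ k, k < ys.length → ys.getD k 0 ∈ ys := by
    intro k hk
    rw [List.getD_eq_getElem ys 0 hk]
    exact List.getElem_mem hk
  constructor
  · intro y hy
    obtain ⟨j, hj, rfl⟩ := List.mem_iff_getElem.mp hy
    rw [← List.getD_eq_getElem ys 0 hj]
    by_cases hrl : r = ys.length
    · have h3 : ys.getD j 0 < pos := hinv j (by omega) hj
      have h2 := getD_mono ys hs j (ys.length - 1) (by omega) (by omega)
      rw [if_pos hrl] at hd
      rcases abs_cases (pos - ys.getD j 0) with ⟨he, _⟩ | ⟨he, _⟩ <;> omega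
    · have hrlt : r < ys.length := lt_of_le_of_ne hr hrl
      have hgt : pos < ys.getD r 0 := lt_of_le_of_ne (hge hrlt) (fun h => hne ⟨hrlt, h.symm⟩)
      by_cases hr0 : r = 0
      · subst hr0
        rw [if_neg hrl, if_pos rfl] at hd
        have h2 := getD_mono ys hs 0 j (Nat.zero_le _) hj
        rcases abs_cases (pos - ys.getD j 0) with ⟨he, _⟩ | ⟨he, _⟩ <;> omega
      · rw [if_neg hrl, if_neg hr0] at hd
        rcases Nat.lt_or_ge j r with hjr | hjr
        · have h3 : ys.getD j 0 < pos := hinv j hjr hj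
          have h2 := getD_mono ys hs j (r - 1) (by omega) (by omega)
          have hmin := min_le_right (ys.getD r 0 - pos) (pos - ys.getD (r - 1) 0)
          rcases abs_cases (pos - ys.getD j 0) with ⟨he, _⟩ | ⟨he, _⟩ <;> omega
        · have h2 := getD_mono ys hs r j hjr hj
          have hmin := min_le_left (ys.getD r 0 - pos) (pos - ys.getD (r - 1) 0)
          rcases abs_cases (pos - ys.getD j 0) with ⟨he, _⟩ | ⟨he, _⟩ <;> omega
  · by_cases hrl : r = ys.length
    · refine ⟨ys.getD (ys.length - 1) 0, hmemD _ (by omega), ?_⟩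
      have h3 : ys.getD (ys.length - 1) 0 < pos := hinv _ (by omega) (by omega)
      rw [if_pos hrl] at hd
      rcases abs_cases (pos - ys.getD (ys.length - 1) 0) with ⟨he, _⟩ | ⟨he, _⟩ <;> omega
    · have hrlt : r < ys.length := lt_of_le_of_ne hr hrl
      have hgt : pos < ys.getD r 0 := lt_of_le_of_ne (hge hrlt) (fun h => hne ⟨hrlt, h.symm⟩)
      by_cases hr0 : r = 0
      · subst hr0
        rw [if_neg hrl, if_pos rfl] at hd
        refine ⟨ys.getD 0 0, hmemD _ hlen, ?_⟩
        rcases abs_cases (pos - ys.getD 0 0) with ⟨he, _⟩ | ⟨he, _⟩ <;> omega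
      · rw [if_neg hrl, if_neg hr0] at hd
        rcases min_cases (ys.getD r 0 - pos) (pos - ys.getD (r - 1) 0) with ⟨he, _⟩ | ⟨he, _⟩
        · refine ⟨ys.getD r 0, hmemD _ hrlt, ?_⟩
          rcases abs_cases (pos - ys.getD r 0) with ⟨ha, _⟩ | ⟨ha, _⟩ <;> omega
        · have h3 : ys.getD (r - 1) 0 < pos := hinv _ (by omega) (by omega)
          refine ⟨ys.getD (r - 1) 0, hmemD _ (by omega), ?_⟩
          rcases abs_cases (pos - ys.getD (r - 1) 0) with ⟨ha, _⟩ | ⟨ha, _⟩ <;> omega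

lemma fopStep_eq (ys occ : List Int) (pos : Int) (i : Nat) (s : Int × Int)
    (hmem : ∀ x, x ∈ ys ↔ x ∈ occ) (hys : ys ≠ [])
    (hs : ys.Pairwise (· ≤ ·)) (hile : i ≤ ys.length) (hinv : FopInv ys i pos) :
    fopStepB ys (i, s) pos = (fopAdvance ys pos i, fopStepA occ s pos) := by
  obtain ⟨hr, hinv', hge⟩ := fopAdvance_spec ys pos i hile hinv
  simp only [fopStepB, fopStepA]
  by_cases hc : fopAdvance ys pos i < ys.length ∧ ys.getD (fopAdvance ys pos i) 0 = pos
  · have hmempos : pos ∈ occ := by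
      refine (hmem pos).mp ?_
      rw [← hc.2, List.getD_eq_getElem ys 0 hc.1]
      exact List.getElem_mem hc.1
    have hcont : occ.contains pos = true := by
      rw [List.contains_iff_mem]; exact hmempos
    rw [if_pos hc, if_pos hcont]
  · have hncont : occ.contains pos = false := by
      rw [Bool.eq_false_iff]
      intro h
      have hpy : pos ∈ ys := (hmem pos).mpr (List.contains_iff_mem.mp h)
      obtain ⟨j, hj, hget⟩ := List.mem_iff_getElem.mp hpy
      rw [← List.getD_eq_getElem ys 0 hj] at hget
      rcases Nat.lt_or_ge j (fopAdvance ys pos i) with hjr | hjr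
      · have := hinv' j hjr hj
        omega
      · have hrlt : fopAdvance ys pos i < ys.length := Nat.lt_of_le_of_lt hjr hj
        have h1 := getD_mono ys hs (fopAdvance ys pos i) j hjr hj
        have h2 := hge hrlt
        exact hc ⟨hrlt, by omega⟩
    have hoccne : occ ≠ [] := by
      intro h
      subst h
      exact hys (List.eq_nil_iff_forall_not_mem.mpr (fun x hx => (List.not_mem_nil) ((hmem x).mp hx)))
    rw [if_neg hc, if_neg (show ¬(occ.contains pos = true) by rw [hncont]; exact Bool.false_ne_true)]
    cases occ with
    | nil => exact absurd rfl hoccne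
    | cons o t =>
      have hfold : (o :: t).foldl (fun m occ₂ => some (match m with
            | none => |pos - occ₂|
            | some v => min v |pos - occ₂|)) (none : Option Int)
          = some (t.foldl (fun v occ₂ => min v |pos - occ₂|) |pos - o|) := by
        rw [List.foldl_cons]
        exact foldA_opt pos t |pos - o|
      rw [hfold]
      obtain ⟨hA1, hA2, hA3⟩ := foldMin_spec pos t |pos - o|
      obtain ⟨hB1, hB2⟩ := fopD_spec ys pos (fopAdvance ys pos i)
        (if fopAdvance ys pos i = ys.length then pos - ys.getD (ys.length - 1) 0
          else if fopAdvance ys pos i = 0 then ys.getD 0 0 - pos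
          else min (ys.getD (fopAdvance ys pos i) 0 - pos)
            (pos - ys.getD (fopAdvance ys pos i - 1) 0))
        hys hs hr hinv' hge hc rfl
      have hvd : t.foldl (fun v occ₂ => min v |pos - occ₂|) |pos - o|
          = (if fopAdvance ys pos i = ys.length then pos - ys.getD (ys.length - 1) 0
            else if fopAdvance ys pos i = 0 then ys.getD 0 0 - pos
            else min (ys.getD (fopAdvance ys pos i) 0 - pos)
              (pos - ys.getD (fopAdvance ys pos i - 1) 0)) := by
        apply le_antisymm
        · obtain ⟨y, hy, hyeq⟩ := hB2
          rw [hyeq]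
          rcases List.mem_cons.mp ((hmem y).mp hy) with rfl | hyt
          · exact hA1
          · exact hA2 y hyt
        · rcases hA3 with h | ⟨o', ho', h⟩
          · rw [h]
            exact hB1 o ((hmem o).mpr List.mem_cons_self)
          · rw [h]
            exact hB1 o' ((hmem o').mpr (List.mem_cons_of_mem _ ho'))
      rw [hvd]
      show (if (if fopAdvance ys pos i = ys.length then pos - ys.getD (ys.length - 1) 0
            else if fopAdvance ys pos i = 0 then ys.getD 0 0 - pos
            else min (ys.getD (fopAdvance ys pos i) 0 - pos)
              (pos - ys.getD (fopAdvance ys pos i - 1) 0)) > s.1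
            then (fopAdvance ys pos i, (if fopAdvance ys pos i = ys.length then pos - ys.getD (ys.length - 1) 0
            else if fopAdvance ys pos i = 0 then ys.getD 0 0 - pos
            else min (ys.getD (fopAdvance ys pos i) 0 - pos)
              (pos - ys.getD (fopAdvance ys pos i - 1) 0)), pos)
            else (fopAdvance ys pos i, s))
          = (fopAdvance ys pos i,
             if (if fopAdvance ys pos i = ys.length then pos - ys.getD (ys.length - 1) 0
            else if fopAdvance ys pos i = 0 then ys.getD 0 0 - pos
            else min (ys.getD (fopAdvance ys pos i) 0 - pos)
              (pos - ys.getD (fopAdvance ys pos i - 1) 0)) > s.1 then ((if fopAdvance ys pos i = ys.length then pos - ys.getD (ys.length - 1) 0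
            else if fopAdvance ys pos i = 0 then ys.getD 0 0 - pos
            else min (ys.getD (fopAdvance ys pos i) 0 - pos)
              (pos - ys.getD (fopAdvance ys pos i - 1) 0)), pos) else s)
      split_ifs <;> rfl

lemma fop_loop_eq (ys occ : List Int)
    (hmem : ∀ x, x ∈ ys ↔ x ∈ occ) (hys : ys ≠ [])
    (hs : ys.Pairwise (· ≤ ·)) :
    ∀ (L : List Int) (i : Nat) (s : Int × Int),
      i ≤ ys.length → (∀ p ∈ L, FopInv ys i p) → L.Pairwise (· ≤ ·) →
      (L.foldl (fopStepB ys) (i, s)).2 = L.foldl (fopStepA occ) s := by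
  intro L
  induction L with
  | nil => intro i s _ _ _; rfl
  | cons p t ih =>
    intro i s hile hinv hpw
    obtain ⟨hadv_le, hadv_inv, _⟩ := fopAdvance_spec ys p i hile (hinv p List.mem_cons_self)
    rw [List.foldl_cons, List.foldl_cons,
      fopStep_eq ys occ p i s hmem hys hs hile (hinv p List.mem_cons_self)]
    exact ih (fopAdvance ys p i) (fopStepA occ s p) hadv_le
      (fun q hq j hj hjl =>
        lt_of_lt_of_le (hadv_inv j hj hjl) ((List.pairwise_cons.mp hpw).1 q hq))
      (List.pairwise_cons.mp hpw).2

-- ===== VERDICT (by name: the statement is the Claim_ definition above) =====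
theorem find_optimal_position_spec : Claim_equal_find_optimal_position := by
  intro total occ _
  unfold Spec_find_optimal_position find_optimal_position find_optimal_position_alt
  by_cases he : occ.isEmpty
  · rw [if_pos he, if_pos he]
  · rw [if_neg he, if_neg he]
    have hocc : occ ≠ [] := by simpa [List.isEmpty_iff] using he
    have hmem : ∀ x, x ∈ PySem.List.sorted occ (fun x => x) false ↔ x ∈ occ :=
      fun x => PySem.List.mem_sorted occ (fun y => y) false x
    have hysne : PySem.List.sorted occ (fun x => x) false ≠ [] := by
      intro h
      rw [PySem.List.sorted_eq_nil_iff] at h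
      exact hocc h
    have hs : (PySem.List.sorted occ (fun x => x) false).Pairwise (· ≤ ·) :=
      PySem.List.sorted_pairwise occ (fun x => x)
    have hpw : (PySem.List.pyRange 1 (total + 1) 1).Pairwise (· ≤ ·) :=
      List.Pairwise.imp (fun h => le_of_lt h) (PySem.List.pairwise_lt_pyRange_one 1 (total + 1))
    exact (congrArg Prod.snd (fop_loop_eq (PySem.List.sorted occ (fun x => x) false) occ
      hmem hysne hs (PySem.List.pyRange 1 (total + 1) 1) 0 (0, -1) (Nat.zero_le _)
      (fun p _ j hj _ => absurd hj (Nat.not_lt_zero j)) hpw)).symm
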